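-- pv_equiv track=rewrite | github.com/minjeong-kim-dev/codingtest | 프로그래머스/0/181918. 배열 만들기 4/배열 만들기 4.py | solution
-- ===== SOURCE A (Python) =====
-- def solution(arr):
--     stk = []
--
--     i = 0
--
--     while i < len(arr):            # i가 arr의 길이보다 작을때 반복
--
--         if len(stk) == 0:
--             stk.append(arr[i])
--             i += 1
--
--         elif stk[-1] < arr[i]:
--             stk.append(arr[i])
--             i += 1
--
--         elif stk[-1] >= arr[i]:
--             stk.remove(stk[-1])
--
--     return stk
-- ===== SOURCE B (Python) =====
-- def solution(arr):
--     # suffix-minimum pass: keep exactly the elements strictly smaller than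
--     # everything to their right, collected right-to-left, then reversed
--     res = []
--     m = None
--     for x in reversed(arr):
--         if m is None or x < m:
--             res.append(x)
--             m = x
--     res.reverse()
--     return res
-- ===== Notes on version B (the rewrite author's own statement) =====
-- stated objective: faster
-- what changed: Replaces the monotonic stack with cascading pops (and its O(n) stk.remove on every pop) by a single right-to-left suffix-minimum pass keeping elements strictly below the running minimum.
import Mathlib
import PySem

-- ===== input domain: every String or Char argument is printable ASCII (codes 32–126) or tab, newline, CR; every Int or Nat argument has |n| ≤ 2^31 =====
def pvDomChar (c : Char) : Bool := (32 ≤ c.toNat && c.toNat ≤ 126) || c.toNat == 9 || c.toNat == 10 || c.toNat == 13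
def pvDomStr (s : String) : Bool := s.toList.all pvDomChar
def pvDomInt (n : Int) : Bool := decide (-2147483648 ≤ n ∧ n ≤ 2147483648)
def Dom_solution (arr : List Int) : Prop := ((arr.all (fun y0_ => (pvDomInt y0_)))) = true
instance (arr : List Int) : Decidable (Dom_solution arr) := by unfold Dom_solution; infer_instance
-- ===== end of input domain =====

-- B replaces A's monotonic stack with cascading pops (each pop an O(n) stk.remove)
-- by a single right-to-left suffix-minimum pass; return values agree on all inputs.

-- ===== PORT A =====
-- A's while loop: on each iteration either push arr[i] and advance i, or pop the
-- stack (stk.remove(stk[-1]) = remove first occurrence of the last element) and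
-- retry the same i.  `rest` is arr[i:], `stk` the stack in bottom-to-top order.
def solLoop (stk rest : List Int) : List Int :=
  match rest with
  | [] => stk
  | x :: xs =>
    match h : stk.getLast? with
    | none => solLoop (stk ++ [x]) xs
    | some t =>
      if t < x then solLoop (stk ++ [x]) xs
      else solLoop ((PySem.List.remove? stk t).getD []) (x :: xs)
termination_by 2 * rest.length + stk.length
decreasing_by
  · simp; omega
  · simp; omega
  · have hne : stk ≠ [] := by
      intro hk; rw [hk] at h; simp at h
    have hmem : t ∈ stk := List.mem_of_getLast? h
    cases hr : PySem.List.remove? stk t with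
    | none => simp [List.length_pos_iff.mpr hne]
    | some l =>
      have h2 := PySem.List.remove?_eq_some_erase (v := t) (xs := stk) hmem
      rw [hr] at h2
      have hl : l = stk.erase t := Option.some_inj.mp h2
      subst hl
      have := List.length_erase_of_mem hmem
      have := List.length_pos_iff.mpr hne
      simp [List.length_erase_of_mem hmem]
      omega

def solution (arr : List Int) : List Int := solLoop [] arr

-- ===== PORT B =====
-- Source B: res = []; m = None; for x in reversed(arr): if m is None or x < m:
--   res.append(x); m = x.  Then res.reverse(); return res.
-- altStep is the loop body; the state is (res, m) with m = None ↦ none.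
def altStep (acc : List Int × Option Int) (x : Int) : List Int × Option Int :=
  if (match acc.2 with | none => true | some m => decide (x < m)) then
    (acc.1 ++ [x], some x)
  else acc

def solution_alt (arr : List Int) : List Int :=
  let p := arr.reverse.foldl altStep ([], none)
  p.1.reverse

-- ===== PRECONDITION & SPEC =====
def Spec_solution (arr : List Int) (out : List Int) : Prop := out = solution_alt arr
instance (arr : List Int) (out : List Int) : Decidable (Spec_solution arr out) := by unfold Spec_solution; infer_instance

-- ===== CLAIM (what is proved, stated in full; the proofs are below) =====
def Claim_equal_solution : Prop := ∀ (arr : List Int), Dom_solution arr → Spec_solution arr (solution arr)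

-- ===== LEMMAS AND PROOFS =====

-- the common characterisation: keep x iff x is strictly below everything to its right
def keep : List Int → List Int
  | [] => []
  | x :: xs => if ∀ y ∈ xs, x < y then x :: keep xs else keep xs

theorem keep_of_pairwise (l : List Int) (h : l.Pairwise (· < ·)) : keep l = l := by
  induction l with
  | nil => rfl
  | cons a l ih =>
    rw [List.pairwise_cons] at h
    simp only [keep]
    rw [if_pos h.1, ih h.2]

theorem keep_skip (s : List Int) (t x : Int) (r : List Int) (hxt : x ≤ t) :
    keep (s ++ t :: x :: r) = keep (s ++ x :: r) := by
  induction s with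
  | nil =>
    simp only [List.nil_append, keep]
    rw [if_neg]
    intro hall
    have := hall x (by simp)
    omega
  | cons a s ih =>
    simp only [List.cons_append, keep]
    have hiff : (∀ y ∈ s ++ t :: x :: r, a < y) ↔ (∀ y ∈ s ++ x :: r, a < y) := by
      constructor
      · intro hall y hy
        apply hall
        simp at hy ⊢; tauto
      · intro hall y hy
        simp at hy ⊢
        rcases hy with hy | hy | hy | hy
        · exact hall y (by simp [hy])
        · have := hall x (by simp); omega
        · exact hall y (by simp [hy])
        · exact hall y (by simp [hy])
    by_cases hc : ∀ y ∈ s ++ x :: r, a < y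
    · rw [if_pos (hiff.mpr hc), if_pos hc, ih]
    · rw [if_neg (fun h' => hc (hiff.mp h')), if_neg hc, ih]

theorem mem_le_getLast (l : List Int) (t : Int) (hp : l.Pairwise (· < ·))
    (h : l.getLast? = some t) : ∀ y ∈ l, y ≤ t := by
  induction l with
  | nil => simp at h
  | cons a l ih =>
    rw [List.pairwise_cons] at hp
    cases l with
    | nil =>
      simp at h; intro y hy; simp at hy; omega
    | cons b l' =>
      rw [List.getLast?_cons_cons] at h
      intro y hy
      rcases List.mem_cons.mp hy with hy | hy
      · subst hy
        have ht : t ∈ b :: l' := List.mem_of_getLast? h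
        have := hp.1 t ht
        omega
      · exact ih hp.2 h y hy

theorem remove_last (stk : List Int) (t : Int) (hp : stk.Pairwise (· < ·))
    (h : stk.getLast? = some t) : PySem.List.remove? stk t = some stk.dropLast := by
  induction stk with
  | nil => simp at h
  | cons a l ih =>
    cases l with
    | nil =>
      simp at h; subst h
      simp [PySem.List.remove?_cons_self]
    | cons b l' =>
      rw [List.getLast?_cons_cons] at h
      rw [List.pairwise_cons] at hp
      have hat : a < t := hp.1 t (List.mem_of_getLast? h)
      rw [PySem.List.remove?_cons_of_ne _ (show a ≠ t by omega)]
      rw [ih hp.2 h]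
      simp

theorem solLoop_eq_keep (stk rest : List Int) (hp : stk.Pairwise (· < ·)) :
    solLoop stk rest = keep (stk ++ rest) := by
  fun_induction solLoop stk rest with
  | case1 stk =>
    rw [List.append_nil, keep_of_pairwise stk hp]
  | case2 stk x xs h ih =>
    have hstk : stk = [] := by
      cases stk with
      | nil => rfl
      | cons a l => simp [List.getLast?] at h
    subst hstk
    simpa using ih (by simp)
  | case3 stk x xs t h hlt ih =>
    have hle := mem_le_getLast stk t hp h
    have hp' : (stk ++ [x]).Pairwise (· < ·) := by
      rw [List.pairwise_append]
      refine ⟨hp, by simp, ?_⟩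
      intro y hy z hz
      simp at hz; subst hz
      have := hle y hy; omega
    rw [ih hp']
    simp
  | case4 stk x xs t h hlt ih =>
    have hne : stk ≠ [] := by intro hk; rw [hk] at h; simp at h
    rw [remove_last stk t hp h] at ih ⊢
    simp only [Option.getD_some] at ih ⊢
    have hpd : stk.dropLast.Pairwise (· < ·) :=
      hp.sublist (List.dropLast_sublist stk)
    rw [ih hpd]
    have hsplit : stk = stk.dropLast ++ [t] := by
      conv_lhs => rw [← List.dropLast_append_getLast hne]
      congr 1
      have h2 := List.getLast?_eq_some_getLast (l := stk) hne
      rw [h2] at h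
      simpa using h
    conv_rhs => rw [hsplit]
    rw [List.append_assoc]
    exact (keep_skip stk.dropLast t x xs (by omega)).symm

-- invariant of B's right-to-left fold: res holds the kept elements in reverse,
-- m is the minimum of the processed suffix (none iff nothing processed)
theorem alt_fold_inv (l : List Int) :
    (l.reverse.foldl altStep ([], none)).1 = (keep l).reverse ∧
    (match (l.reverse.foldl altStep ([], none)).2 with
      | none => l = []
      | some m0 => m0 ∈ l ∧ ∀ y ∈ l, m0 ≤ y) := by
  induction l with
  | nil => simp [keep]
  | cons x xs ih =>
    rcases hst : xs.reverse.foldl altStep ([], none) with ⟨res, m⟩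
    rw [hst] at ih
    obtain ⟨ihr, ihm⟩ := ih
    rw [List.reverse_cons, List.foldl_append, hst]
    simp only [List.foldl_cons, List.foldl_nil]
    cases m with
    | none =>
      simp only at ihm
      subst ihm
      simp_all [altStep, keep]
    | some m0 =>
      obtain ⟨hmem, hmin⟩ := ihm
      have ihr' : res = (keep xs).reverse := ihr
      by_cases hx : x < m0
      · have hkeep : ∀ y ∈ xs, x < y := fun y hy => by have := hmin y hy; omega
        simp only [altStep, hx, decide_true, if_true]
        constructor
        · rw [ihr']; rw [show keep (x :: xs) = x :: keep xs from by simp [keep]; intro y hy; exact hkeep y hy]; simp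
        · refine ⟨by simp, ?_⟩
          intro y hy
          rcases List.mem_cons.mp hy with hy | hy
          · omega
          · have := hmin y hy; omega
      · have hnkeep : ¬ ∀ y ∈ xs, x < y := by
          intro hall; exact hx (by have := hall m0 hmem; omega)
        simp only [altStep, hx, decide_false, Bool.false_eq_true, if_false]
        constructor
        · rw [ihr', show keep (x :: xs) = keep xs from by simp only [keep]; rw [if_neg hnkeep]]
        · refine ⟨by simp [hmem], ?_⟩
          intro y hy
          rcases List.mem_cons.mp hy with hy | hy
          · omega
          · exact hmin y hy

theorem alt_eq_keep (arr : List Int) : solution_alt arr = keep arr := by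
  simp only [solution_alt]
  rw [(alt_fold_inv arr).1, List.reverse_reverse]

-- ===== VERDICT (by name: the statement is the Claim_ definition above) =====
theorem solution_spec : Claim_equal_solution := by
  intro arr _
  unfold Spec_solution solution
  rw [solLoop_eq_keep [] arr (by simp), alt_eq_keep]
  simp
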